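-- pv_equiv track=rewrite | github.com/maxim283b/mcp_neo4j | mcp_neo4j.py | _tags_to_list
-- ===== SOURCE A (Python) =====
-- from typing import List, Dict, Any, Literal, Optional, Tuple
--
-- def _tags_to_list(v: Any) -> List[str]:
--     """
--     Tags in DB can be:
--       - list
--       - string with '.' separated tokens
--       - string with ',' separated tokens
--     We normalize into list[str].
--     """
--     if v is None:
--         return []
--     if isinstance(v, list):
--         return [str(x) for x in v if str(x).strip()]
--     s = str(v).strip()
--     if not s:
--         return []
--     # first split by '.' (your dataset uses dot-separated tags a lot)
--     parts = []
--     for chunk in s.split("."):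
--         chunk = chunk.strip()
--         if not chunk:
--             continue
--         # if inside chunk still comma-separated
--         parts.extend([x.strip() for x in chunk.split(",") if x.strip()])
--     return parts
-- ===== SOURCE B (Python) =====
-- from typing import Any, List
--
--
-- def _tags_to_list(v: Any) -> List[str]:
--     """Normalize tags (None | list | '.'/','-separated string) into list[str]."""
--     if v is None:
--         return []
--     if isinstance(v, list):
--         return [str(x) for x in v if str(x).strip()]
--     out = []
--     cur = []
--     for ch in str(v):
--         if ch in ".,":
--             t = "".join(cur).strip()
--             if t:
--                 out.append(t)
--             cur = []
--         else:
--             cur.append(ch)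
--     t = "".join(cur).strip()
--     if t:
--         out.append(t)
--     return out
-- ===== Notes on version B (the rewrite author's own statement) =====
-- stated objective: alternative
-- what changed: The string branch's split-on-dot-then-split-each-chunk-on-comma nested passes are replaced by a single-pass character scanner: one loop over the characters with an explicit current-token accumulator that flushes (strip, drop if empty) on each '.' or ',' and once at the end; no split/replace/strip-of-the-whole-string at all.
import Mathlib
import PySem

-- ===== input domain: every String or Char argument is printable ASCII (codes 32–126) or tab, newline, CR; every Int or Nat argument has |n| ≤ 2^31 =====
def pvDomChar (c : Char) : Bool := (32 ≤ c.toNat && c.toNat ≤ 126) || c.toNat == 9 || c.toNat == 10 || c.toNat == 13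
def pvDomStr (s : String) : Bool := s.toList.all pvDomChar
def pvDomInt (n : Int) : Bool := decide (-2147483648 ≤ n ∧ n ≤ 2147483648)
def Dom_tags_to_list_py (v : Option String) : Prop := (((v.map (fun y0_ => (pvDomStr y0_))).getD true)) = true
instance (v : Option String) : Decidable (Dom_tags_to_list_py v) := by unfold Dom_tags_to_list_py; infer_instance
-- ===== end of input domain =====

-- B replaces A's nested split-on-'.'-then-','-per-chunk passes by a single-pass
-- character scanner with a current-token accumulator that flushes on each delimiter.
-- (The Option String argument covers only the None and string cases of the Python;
-- the isinstance(list) branch is outside this signature.)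

-- ===== PORT A =====
-- the Python `s.split(sep)` with a literal non-empty sep: split? is always `some` here
def pvSplit (s sep : String) : List String := (PySem.Str.split? s sep).getD []

def tags_to_list_py (v : Option String) : List String :=
  match v with
  | none => []
  | some v0 =>
    let s := PySem.Str.strip v0
    if s = "" then []
    else
      (pvSplit s ".").foldl (fun parts chunk =>
        let chunk := PySem.Str.strip chunk
        if chunk = "" then parts
        else
          parts ++
            ((pvSplit chunk ",").filter (fun x => PySem.Str.strip x ≠ "")).map PySem.Str.strip)
        []

-- ===== PORT B =====
-- loop body: on a delimiter flush the current token (strip it, drop if empty), else append the char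
def pvStep (st : List String × List Char) (ch : Char) : List String × List Char :=
  if ch = '.' ∨ ch = ',' then
    let t := PySem.Str.strip (String.ofList st.2)   -- "".join(cur).strip()
    (if t = "" then st.1 else st.1 ++ [t], [])
  else (st.1, st.2 ++ [ch])

-- the trailing flush after the loop (textually the same code as the delimiter branch)
def pvFinalize (st : List String × List Char) : List String :=
  let t := PySem.Str.strip (String.ofList st.2)
  if t = "" then st.1 else st.1 ++ [t]

def tags_to_list_py_alt (v : Option String) : List String :=
  match v with
  | none => []
  | some v0 => pvFinalize (v0.toList.foldl pvStep ([], []))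

-- ===== PRECONDITION & SPEC =====
def Spec_tags_to_list_py (v : Option String) (out : List String) : Prop := out = tags_to_list_py_alt v
instance (v : Option String) (out : List String) : Decidable (Spec_tags_to_list_py v out) := by unfold Spec_tags_to_list_py; infer_instance

-- ===== CLAIM (what is proved, stated in full; the proofs are below) =====
def Claim_equal_tags_to_list_py : Prop := ∀ (v : Option String), Dom_tags_to_list_py v → Spec_tags_to_list_py v (tags_to_list_py v)

-- ===== LEMMAS AND PROOFS =====

-- structural single-character split (proof-side characterization of Chars.splitOn s [d])
def pvSplitC (d : Char) : List Char → List (List Char)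
  | [] => [[]]
  | c :: t =>
    if c = d then [] :: pvSplitC d t
    else
      match pvSplitC d t with
      | [] => [[c]]
      | h :: r => (c :: h) :: r

-- split on either delimiter at once (the token stream B's scanner walks)
def pvSplitD : List Char → List (List Char)
  | [] => [[]]
  | c :: t =>
    if c = '.' ∨ c = ',' then [] :: pvSplitD t
    else
      match pvSplitD t with
      | [] => [[c]]
      | h :: r => (c :: h) :: r

theorem pvSplitC_ne_nil (d : Char) (l : List Char) : pvSplitC d l ≠ [] := by
  cases l with
  | nil => simp [pvSplitC]
  | cons c t =>
    simp only [pvSplitC]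
    split
    · simp
    · split <;> simp_all

theorem pvSplitD_ne_nil (l : List Char) : pvSplitD l ≠ [] := by
  cases l with
  | nil => simp [pvSplitD]
  | cons c t =>
    simp only [pvSplitD]
    split
    · simp
    · split <;> simp_all

theorem pvSplitOn_go_eq (d : Char) (l cur : List Char) (accs : List (List Char)) (fuel : Nat)
    (h : l.length < fuel) :
    PySem.Chars.splitOn.go [d] fuel l cur accs =
      accs.reverse ++
        (match pvSplitC d l with
         | [] => []
         | h :: r => (cur.reverse ++ h) :: r) := by
  induction l generalizing fuel cur accs with
  | nil =>
    cases fuel with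
    | zero => omega
    | succ f => simp [PySem.Chars.splitOn.go, pvSplitC]
  | cons c t ih =>
    cases fuel with
    | zero => omega
    | succ f =>
      simp only [PySem.Chars.splitOn.go]
      by_cases hc : c = d
      · have hp : List.isPrefixOf [d] (c :: t) = true := by
          simp [List.isPrefixOf, hc]
        rw [if_pos hp]
        rw [show List.drop (List.length [d]) (c :: t) = t by simp]
        simp only [List.length_cons] at h
        rw [ih [] (List.cons cur.reverse accs) f (by omega)]
        rcases hS : pvSplitC d t with _ | ⟨hh, r⟩
        · exact absurd hS (pvSplitC_ne_nil d t)
        · simp [pvSplitC, hc, hS]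
      · have hp : List.isPrefixOf [d] (c :: t) = false := by
          simp only [List.isPrefixOf, Bool.and_eq_false_iff]
          left
          simp [beq_eq_false_iff_ne]
          intro h'; exact absurd h'.symm hc
        rw [if_neg (by simp [hp])]
        simp only [List.length_cons] at h
        rw [ih (c :: cur) accs f (by omega)]
        rcases hS : pvSplitC d t with _ | ⟨hh, r⟩
        · exact absurd hS (pvSplitC_ne_nil d t)
        · simp [pvSplitC, hc, hS]

theorem pvSplitOn_eq (d : Char) (l : List Char) :
    PySem.Chars.splitOn l [d] = pvSplitC d l := by
  unfold PySem.Chars.splitOn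
  rw [pvSplitOn_go_eq d l [] [] (l.length + 1) (by omega)]
  rcases hS : pvSplitC d l with _ | ⟨h, r⟩
  · exact absurd hS (pvSplitC_ne_nil d l)
  · simp

-- splitting on both delimiters at once = splitting on '.' then each piece on ','
theorem pvSplitD_eq (l : List Char) :
    pvSplitD l = (pvSplitC '.' l).flatMap (pvSplitC ',') := by
  induction l with
  | nil => simp [pvSplitD, pvSplitC]
  | cons c t ih =>
    by_cases hc : c = '.'
    · subst hc
      simp only [pvSplitD, ih]
      simp [pvSplitC, List.flatMap_cons]
    · by_cases hc2 : c = ','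
      · subst hc2
        rcases hS : pvSplitC '.' t with _ | ⟨h, r⟩
        · exact absurd hS (pvSplitC_ne_nil '.' t)
        · simp only [pvSplitD, ih, hS]
          simp [pvSplitC, hc, hS, List.flatMap_cons]
      · have hnd : ¬ (c = '.' ∨ c = ',') := by tauto
        rcases hS : pvSplitC '.' t with _ | ⟨h, r⟩
        · exact absurd hS (pvSplitC_ne_nil '.' t)
        · rcases hS2 : pvSplitC ',' h with _ | ⟨hh, rr⟩
          · exact absurd hS2 (pvSplitC_ne_nil ',' h)
          · simp only [pvSplitD, if_neg hnd, ih, hS]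
            simp [pvSplitC, hc, hc2, List.flatMap_cons, hS, hS2]

theorem pvRstrip_snoc_space (h : List Char) (x : Char) (hx : PySem.Chars.isspace x = true) :
    PySem.Chars.rstrip (h ++ [x]) = PySem.Chars.rstrip h := by
  simp [PySem.Chars.rstrip, hx]

theorem pvStrip_snoc_space (h : List Char) (x : Char) (hx : PySem.Chars.isspace x = true) :
    PySem.Chars.strip (h ++ [x]) = PySem.Chars.strip h := by
  simp only [PySem.Chars.strip, PySem.Chars.lstrip, List.dropWhile_append]
  by_cases he : (List.dropWhile PySem.Chars.isspace h).isEmpty = true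
  · rw [if_pos he]
    simp [hx, List.isEmpty_iff.mp he, PySem.Chars.rstrip]
  · rw [if_neg he]
    exact pvRstrip_snoc_space _ x hx

theorem pvStrip_cons_space (h : List Char) (x : Char) (hx : PySem.Chars.isspace x = true) :
    PySem.Chars.strip (x :: h) = PySem.Chars.strip h := by
  simp [PySem.Chars.strip, PySem.Chars.lstrip, hx]

def pvSnocLast (x : Char) : List (List Char) → List (List Char)
  | [] => [[x]]
  | [h] => [h ++ [x]]
  | h :: r => h :: pvSnocLast x r

theorem pvSplitC_snoc (d x : Char) (t : List Char) (hx : x ≠ d) :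
    pvSplitC d (t ++ [x]) = pvSnocLast x (pvSplitC d t) := by
  induction t with
  | nil => simp [pvSplitC, if_neg hx, pvSnocLast]
  | cons c t' ih =>
    by_cases hc : c = d
    · rcases hS : pvSplitC d t' with _ | ⟨h, r⟩
      · exact absurd hS (pvSplitC_ne_nil d t')
      · rw [List.cons_append]
        simp only [pvSplitC, if_pos hc, ih, hS]
        cases r <;> simp [pvSnocLast]
    · rw [List.cons_append]
      simp only [pvSplitC, if_neg hc, ih]
      rcases hS : pvSplitC d t' with _ | ⟨h, r⟩
      · exact absurd hS (pvSplitC_ne_nil d t')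
      · cases r with
        | nil => simp [pvSnocLast]
        | cons r0 rs => simp [pvSnocLast]

theorem pvSplitD_snoc (x : Char) (t : List Char) (hx : ¬ (x = '.' ∨ x = ',')) :
    pvSplitD (t ++ [x]) = pvSnocLast x (pvSplitD t) := by
  induction t with
  | nil => simp [pvSplitD, if_neg hx, pvSnocLast]
  | cons c t' ih =>
    by_cases hc : c = '.' ∨ c = ','
    · rcases hS : pvSplitD t' with _ | ⟨h, r⟩
      · exact absurd hS (pvSplitD_ne_nil t')
      · rw [List.cons_append]
        simp only [pvSplitD, if_pos hc, ih, hS]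
        cases r <;> simp [pvSnocLast]
    · rw [List.cons_append]
      simp only [pvSplitD, if_neg hc, ih]
      rcases hS : pvSplitD t' with _ | ⟨h, r⟩
      · exact absurd hS (pvSplitD_ne_nil t')
      · cases r with
        | nil => simp [pvSnocLast]
        | cons r0 rs => simp [pvSnocLast]

theorem pvMapStrip_snocLast (x : Char) (hx : PySem.Chars.isspace x = true)
    (S : List (List Char)) (hS : S ≠ []) :
    (pvSnocLast x S).map PySem.Chars.strip = S.map PySem.Chars.strip := by
  induction S with
  | nil => exact absurd rfl hS
  | cons h r ih =>
    cases r with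
    | nil => simp [pvSnocLast, pvStrip_snoc_space h x hx]
    | cons r0 rs => simp [pvSnocLast, ih]

theorem pvIsspace_ne_comma (x : Char) (hx : PySem.Chars.isspace x = true) : x ≠ ',' := by
  intro h; subst h; simp [PySem.Chars.isspace] at hx

theorem pvIsspace_not_delim (x : Char) (hx : PySem.Chars.isspace x = true) :
    ¬ (x = '.' ∨ x = ',') := by
  rintro (h | h) <;> subst h <;> simp [PySem.Chars.isspace] at hx

theorem pvMapStrip_splitC_lstrip (l : List Char) :
    (pvSplitC ',' (PySem.Chars.lstrip l)).map PySem.Chars.strip =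
      (pvSplitC ',' l).map PySem.Chars.strip := by
  induction l with
  | nil => rfl
  | cons c t ih =>
    by_cases hc : PySem.Chars.isspace c = true
    · rw [show PySem.Chars.lstrip (c :: t) = PySem.Chars.lstrip t by
        simp [PySem.Chars.lstrip, hc]]
      rw [ih]
      rcases hS : pvSplitC ',' t with _ | ⟨h, r⟩
      · exact absurd hS (pvSplitC_ne_nil ',' t)
      · simp [pvSplitC, if_neg (pvIsspace_ne_comma c hc), hS,
          pvStrip_cons_space h c hc]
    · rw [show PySem.Chars.lstrip (c :: t) = c :: t by
        simp [PySem.Chars.lstrip, hc]]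

theorem pvMapStrip_splitC_rstrip (l : List Char) :
    (pvSplitC ',' (PySem.Chars.rstrip l)).map PySem.Chars.strip =
      (pvSplitC ',' l).map PySem.Chars.strip := by
  induction l using List.reverseRecOn with
  | nil => rfl
  | append_singleton t x ih =>
    by_cases hx : PySem.Chars.isspace x = true
    · rw [pvRstrip_snoc_space t x hx, ih,
        pvSplitC_snoc ',' x t (pvIsspace_ne_comma x hx),
        pvMapStrip_snocLast x hx _ (pvSplitC_ne_nil ',' t)]
    · rw [show PySem.Chars.rstrip (t ++ [x]) = t ++ [x] by
        simp [PySem.Chars.rstrip, hx]]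

theorem pvMapStrip_splitC_strip (l : List Char) :
    (pvSplitC ',' (PySem.Chars.strip l)).map PySem.Chars.strip =
      (pvSplitC ',' l).map PySem.Chars.strip := by
  rw [show PySem.Chars.strip l = PySem.Chars.rstrip (PySem.Chars.lstrip l) from rfl,
    pvMapStrip_splitC_rstrip, pvMapStrip_splitC_lstrip]

theorem pvMapStrip_splitD_lstrip (l : List Char) :
    (pvSplitD (PySem.Chars.lstrip l)).map PySem.Chars.strip =
      (pvSplitD l).map PySem.Chars.strip := by
  induction l with
  | nil => rfl
  | cons c t ih =>
    by_cases hc : PySem.Chars.isspace c = true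
    · rw [show PySem.Chars.lstrip (c :: t) = PySem.Chars.lstrip t by
        simp [PySem.Chars.lstrip, hc]]
      rw [ih]
      rcases hS : pvSplitD t with _ | ⟨h, r⟩
      · exact absurd hS (pvSplitD_ne_nil t)
      · simp [pvSplitD, if_neg (pvIsspace_not_delim c hc), hS,
          pvStrip_cons_space h c hc]
    · rw [show PySem.Chars.lstrip (c :: t) = c :: t by
        simp [PySem.Chars.lstrip, hc]]

theorem pvMapStrip_splitD_rstrip (l : List Char) :
    (pvSplitD (PySem.Chars.rstrip l)).map PySem.Chars.strip =
      (pvSplitD l).map PySem.Chars.strip := by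
  induction l using List.reverseRecOn with
  | nil => rfl
  | append_singleton t x ih =>
    by_cases hx : PySem.Chars.isspace x = true
    · rw [pvRstrip_snoc_space t x hx, ih,
        pvSplitD_snoc x t (pvIsspace_not_delim x hx),
        pvMapStrip_snocLast x hx _ (pvSplitD_ne_nil t)]
    · rw [show PySem.Chars.rstrip (t ++ [x]) = t ++ [x] by
        simp [PySem.Chars.rstrip, hx]]

theorem pvMapStrip_splitD_strip (l : List Char) :
    (pvSplitD (PySem.Chars.strip l)).map PySem.Chars.strip =
      (pvSplitD l).map PySem.Chars.strip := by
  rw [show PySem.Chars.strip l = PySem.Chars.rstrip (PySem.Chars.lstrip l) from rfl,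
    pvMapStrip_splitD_rstrip, pvMapStrip_splitD_lstrip]

-- filter-then-strip = strip-then-filter, for any token list
theorem pvHfm (S : List (List Char)) :
    (S.filter (fun x => PySem.Chars.strip x ≠ [])).map PySem.Chars.strip =
      (S.map PySem.Chars.strip).filter (fun x => x ≠ []) := by
  rw [List.filter_map]
  rfl

-- chars-level statement: A's string branch = strip/filter of B's dual-delimiter token stream
theorem pvChars_main (s : List Char) :
    ((pvSplitC '.' (PySem.Chars.strip s)).flatMap (fun chunk =>
        if PySem.Chars.strip chunk = [] then []
        else ((pvSplitC ',' (PySem.Chars.strip chunk)).filter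
              (fun x => PySem.Chars.strip x ≠ [])).map PySem.Chars.strip)) =
      ((pvSplitD s).map PySem.Chars.strip).filter (fun x => x ≠ []) := by
  have hchunk : ∀ chunk : List Char,
      (if PySem.Chars.strip chunk = [] then ([] : List (List Char))
       else ((pvSplitC ',' (PySem.Chars.strip chunk)).filter
              (fun x => PySem.Chars.strip x ≠ [])).map PySem.Chars.strip) =
      ((pvSplitC ',' chunk).filter
          (fun x => PySem.Chars.strip x ≠ [])).map PySem.Chars.strip := by
    intro chunk
    by_cases hc : PySem.Chars.strip chunk = []
    · rw [if_pos hc, pvHfm (pvSplitC ',' chunk), ← pvMapStrip_splitC_strip chunk, hc]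
      simp [pvSplitC, PySem.Chars.strip, PySem.Chars.lstrip, PySem.Chars.rstrip]
    · rw [if_neg hc, pvHfm (pvSplitC ',' (PySem.Chars.strip chunk)), pvMapStrip_splitC_strip chunk,
        pvHfm (pvSplitC ',' chunk)]
  calc ((pvSplitC '.' (PySem.Chars.strip s)).flatMap (fun chunk =>
        if PySem.Chars.strip chunk = [] then []
        else ((pvSplitC ',' (PySem.Chars.strip chunk)).filter
              (fun x => PySem.Chars.strip x ≠ [])).map PySem.Chars.strip))
      = (pvSplitC '.' (PySem.Chars.strip s)).flatMap (fun chunk =>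
          ((pvSplitC ',' chunk).filter
              (fun x => PySem.Chars.strip x ≠ [])).map PySem.Chars.strip) := by
        rw [show (fun chunk =>
          if PySem.Chars.strip chunk = [] then ([] : List (List Char))
          else ((pvSplitC ',' (PySem.Chars.strip chunk)).filter
              (fun x => PySem.Chars.strip x ≠ [])).map PySem.Chars.strip) =
          (fun chunk => ((pvSplitC ',' chunk).filter
              (fun x => PySem.Chars.strip x ≠ [])).map PySem.Chars.strip) from funext hchunk]
    _ = (((pvSplitC '.' (PySem.Chars.strip s)).flatMap (pvSplitC ',')).filter
          (fun t => PySem.Chars.strip t ≠ [])).map PySem.Chars.strip := by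
        rw [List.filter_flatMap, List.map_flatMap]
    _ = ((pvSplitD (PySem.Chars.strip s)).filter
          (fun t => PySem.Chars.strip t ≠ [])).map PySem.Chars.strip := by
        rw [pvSplitD_eq]
    _ = ((pvSplitD (PySem.Chars.strip s)).map PySem.Chars.strip).filter (fun x => x ≠ []) := by
        rw [pvHfm]
    _ = ((pvSplitD s).map PySem.Chars.strip).filter (fun x => x ≠ []) := by
        rw [pvMapStrip_splitD_strip]

-- ===== String ↔ List Char bridging =====

theorem pvOfList_eq_empty (c : List Char) : (String.ofList c = "") ↔ c = [] := by
  constructor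
  · intro h
    have := congrArg String.toList h
    simpa using this
  · intro h; subst h; rfl

theorem pvStrip_ofList (c : List Char) :
    PySem.Str.strip (String.ofList c) = String.ofList (PySem.Chars.strip c) := by
  simp [PySem.Str.strip]

theorem pvSplit_dot (cs : List Char) :
    pvSplit (String.ofList cs) "." = (pvSplitC '.' cs).map String.ofList := by
  rw [pvSplit, PySem.Str.split?]
  rw [show (".".toList) = ['.'] by decide]
  simp [PySem.Chars.split?, pvSplitOn_eq]

theorem pvSplit_comma (cs : List Char) :
    pvSplit (String.ofList cs) "," = (pvSplitC ',' cs).map String.ofList := by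
  rw [pvSplit, PySem.Str.split?]
  rw [show (",".toList) = [','] by decide]
  simp [PySem.Chars.split?, pvSplitOn_eq]

-- A's string branch, pushed down to the char level
theorem pvA_eq (v0 : String) :
    tags_to_list_py (some v0) =
      ((pvSplitC '.' (PySem.Chars.strip v0.toList)).flatMap (fun chunk =>
        if PySem.Chars.strip chunk = [] then []
        else ((pvSplitC ',' (PySem.Chars.strip chunk)).filter
              (fun x => PySem.Chars.strip x ≠ [])).map PySem.Chars.strip)).map String.ofList := by
  have hstrip : PySem.Str.strip v0 = String.ofList (PySem.Chars.strip v0.toList) := rfl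
  simp only [tags_to_list_py, hstrip]
  by_cases hS : PySem.Chars.strip v0.toList = []
  · rw [if_pos ((pvOfList_eq_empty _).mpr hS), hS]
    simp [pvSplitC, show PySem.Chars.strip [] = [] from rfl]
  · rw [if_neg (fun h => hS ((pvOfList_eq_empty _).mp h))]
    rw [pvSplit_dot, List.foldl_map]
    rw [show (fun (parts : List String) (c : List Char) =>
          let chunk := PySem.Str.strip (String.ofList c)
          if chunk = "" then parts
          else parts ++ ((pvSplit chunk ",").filter
                (fun x => PySem.Str.strip x ≠ "")).map PySem.Str.strip) =
        (fun (parts : List String) (c : List Char) =>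
          parts ++ ((if PySem.Chars.strip c = [] then ([] : List (List Char))
            else ((pvSplitC ',' (PySem.Chars.strip c)).filter
              (fun x => PySem.Chars.strip x ≠ [])).map PySem.Chars.strip).map String.ofList)) by
      funext parts c
      show (if PySem.Str.strip (String.ofList c) = "" then parts
            else parts ++ ((pvSplit (PySem.Str.strip (String.ofList c)) ",").filter
                (fun x => PySem.Str.strip x ≠ "")).map PySem.Str.strip) = _
      rw [pvStrip_ofList]
      by_cases h : PySem.Chars.strip c = []
      · rw [if_pos ((pvOfList_eq_empty _).mpr h), if_pos h]
        simp
      · rw [if_neg (fun hh => h ((pvOfList_eq_empty _).mp hh)), if_neg h, pvSplit_comma]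
        rw [List.filter_map]
        rw [show ((fun x => decide (PySem.Str.strip x ≠ "")) ∘ String.ofList) =
            (fun x => decide (PySem.Chars.strip x ≠ [])) by
          funext x
          simp [pvStrip_ofList]]
        rw [List.map_map, List.map_map]
        rw [show (PySem.Str.strip ∘ String.ofList) = (String.ofList ∘ PySem.Chars.strip) by
          funext x; exact pvStrip_ofList x]]
    rw [PySem.List.foldl_append_eq_flatMap, List.map_flatMap]
    rfl

-- ===== B's scanner, characterized by the dual-delimiter token stream =====

-- flush a token list: strip each token, drop the empty ones
def pvFlush (S : List (List Char)) : List String :=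
  ((S.map PySem.Chars.strip).filter (fun x => x ≠ [])).map String.ofList

def pvConsHead (cur : List Char) : List (List Char) → List (List Char)
  | [] => [cur]
  | h :: r => (cur ++ h) :: r

theorem pvFinalize_eq (out : List String) (cur : List Char) :
    pvFinalize (out, cur) = out ++ pvFlush [cur] := by
  unfold pvFinalize pvFlush
  rw [pvStrip_ofList]
  by_cases h : PySem.Chars.strip cur = []
  · rw [if_pos ((pvOfList_eq_empty _).mpr h)]
    simp [h]
  · rw [if_neg (fun hh => h ((pvOfList_eq_empty _).mp hh))]
    simp [h]

theorem pvFlush_cons (h : List Char) (r : List (List Char)) :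
    pvFlush (h :: r) = pvFlush [h] ++ pvFlush r := by
  unfold pvFlush
  by_cases hh : PySem.Chars.strip h = [] <;> simp [hh]

theorem pvScan (l : List Char) : ∀ (cur : List Char) (out : List String),
    pvFinalize (l.foldl pvStep (out, cur)) = out ++ pvFlush (pvConsHead cur (pvSplitD l)) := by
  induction l with
  | nil =>
    intro cur out
    simp [pvSplitD, pvConsHead, pvFinalize_eq]
  | cons c t ih =>
    intro cur out
    by_cases hd : c = '.' ∨ c = ','
    · rw [List.foldl_cons,
        show pvStep (out, cur) c = (pvFinalize (out, cur), []) by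
          simp [pvStep, pvFinalize, if_pos hd]]
      rw [ih [] (pvFinalize (out, cur))]
      rcases hS : pvSplitD t with _ | ⟨h, r⟩
      · exact absurd hS (pvSplitD_ne_nil t)
      · simp only [pvSplitD, if_pos hd, hS, pvConsHead, List.nil_append, List.append_nil]
        rw [pvFinalize_eq, pvFlush_cons cur (h :: r), List.append_assoc]
    · rw [List.foldl_cons,
        show pvStep (out, cur) c = (out, cur ++ [c]) by simp [pvStep, if_neg hd]]
      rw [ih (cur ++ [c]) out]
      rcases hS : pvSplitD t with _ | ⟨h, r⟩
      · exact absurd hS (pvSplitD_ne_nil t)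
      · simp [pvSplitD, if_neg hd, hS, pvConsHead, List.append_assoc]

theorem pvB_eq (v0 : String) :
    tags_to_list_py_alt (some v0) = pvFlush (pvSplitD v0.toList) := by
  show pvFinalize (v0.toList.foldl pvStep ([], [])) = _
  rw [pvScan v0.toList [] []]
  rcases hS : pvSplitD v0.toList with _ | ⟨h, r⟩
  · exact absurd hS (pvSplitD_ne_nil v0.toList)
  · simp [pvConsHead]

-- ===== VERDICT (by name: the statement is the Claim_ definition above) =====
theorem tags_to_list_py_spec : Claim_equal_tags_to_list_py := by
  intro v _
  unfold Spec_tags_to_list_py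
  cases v with
  | none => rfl
  | some v0 =>
    rw [pvA_eq v0, pvChars_main, pvB_eq v0]
    rfl
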